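-- pv_equiv track=rewrite | github.com/eury-dice/100-days-of-python | Day011/blackjack.py | change_ace
-- ===== SOURCE A (Python) =====
-- def change_ace(cards):
--     #Changes ace (if there are any) from 11 to 1 if player/dealer is above 21
--     score = sum(cards)
--     while 11 in cards:
--         ace = cards.index(11)
--         cards[ace] = 1
--         score -= 10
--         if score < 22:
--             break
--
--     return cards, score
-- ===== SOURCE B (Python) =====
-- def change_ace(cards):
--     # Single front-to-back pass: lower each 11 to 1, stopping once score < 22
--     # (the break is tested after lowering, so at least one ace is lowered when present).
--     score = sum(cards)
--     for i, c in enumerate(cards):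
--         if c == 11:
--             cards[i] = 1
--             score -= 10
--             if score < 22:
--                 break
--     return cards, score
-- ===== Notes on version B (the rewrite author's own statement) =====
-- stated objective: alternative
-- what changed: Replaces the repeated 'while 11 in cards / cards.index(11)' rescanning loop with a single front-to-back enumerate pass that lowers each 11 in place and breaks once score < 22.
import Mathlib
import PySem

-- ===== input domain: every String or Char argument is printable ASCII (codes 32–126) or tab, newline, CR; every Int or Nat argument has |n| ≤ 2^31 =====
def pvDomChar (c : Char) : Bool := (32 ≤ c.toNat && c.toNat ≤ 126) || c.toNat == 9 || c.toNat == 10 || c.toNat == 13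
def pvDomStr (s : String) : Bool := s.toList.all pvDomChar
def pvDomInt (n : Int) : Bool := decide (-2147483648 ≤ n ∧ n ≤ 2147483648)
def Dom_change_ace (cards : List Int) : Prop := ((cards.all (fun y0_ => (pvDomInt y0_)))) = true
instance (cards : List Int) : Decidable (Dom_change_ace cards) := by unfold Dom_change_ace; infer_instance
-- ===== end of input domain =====

-- B replaces A's repeated 'while 11 in cards / index(11)' rescanning loop with one front-to-back pass (alternative single-pass algorithm); A and B both mutate the caller's list in place, the theorems are about the return value.


-- ===== PORT A =====
-- termination helper: setting the first 11 to 1 strictly decreases the number of 11s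
theorem pv_count_set_lt (cards : List Int) (ace : Nat)
    (h : PySem.List.index? cards 11 = some ace) :
    (cards.set ace 1).count 11 < cards.count 11 := by
  rcases (PySem.List.index?_eq_some_iff _ _ _).1 h with ⟨pre, suf, rfl, hlen, hnm⟩
  subst hlen
  rw [List.set_append_right _ _ (Nat.le_refl _)]
  simp [List.count_append]

-- A's while-loop: rescan for the first 11 each iteration
def change_ace_go (cards : List Int) (score : Int) : List Int × Int :=
  match h : PySem.List.index? cards 11 with
  | none => (cards, score)                      -- '11 in cards' is false: loop exits
  | some ace =>
    let cards' := cards.set ace 1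
    let score' := score - 10
    if score' < 22 then (cards', score')
    else change_ace_go cards' score'
termination_by cards.count 11
decreasing_by exact pv_count_set_lt cards ace h

def change_ace (cards : List Int) : List Int × Int :=
  change_ace_go cards cards.sum

-- ===== PORT B =====
-- B's single enumerate pass; in-place mutation rendered as rebuilding the list
def change_ace_alt_go : List Int → Int → List Int × Int
  | [], score => ([], score)
  | c :: rest, score =>
    if c = 11 then
      let score' := score - 10
      if score' < 22 then (1 :: rest, score')   -- break after lowering
      else
        let r := change_ace_alt_go rest score'
        (1 :: r.1, r.2)
    else
      let r := change_ace_alt_go rest score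
      (c :: r.1, r.2)

def change_ace_alt (cards : List Int) : List Int × Int :=
  change_ace_alt_go cards cards.sum

-- ===== PRECONDITION & SPEC =====
def Spec_change_ace (cards : List Int) (out : List Int × Int) : Prop := out = change_ace_alt cards
instance (cards : List Int) (out : List Int × Int) : Decidable (Spec_change_ace cards out) := by unfold Spec_change_ace; infer_instance

-- ===== CLAIM (what is proved, stated in full; the proofs are below) =====
def Claim_equal_change_ace : Prop := ∀ (cards : List Int), Dom_change_ace cards → Spec_change_ace cards (change_ace cards)

-- ===== LEMMAS AND PROOFS =====

-- B's pass copies an 11-free prefix unchanged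
theorem alt_go_prefix (p : List Int) (hnm : (11:Int) ∉ p) :
    ∀ (rest : List Int) (s : Int),
      change_ace_alt_go (p ++ rest) s =
        ((p ++ (change_ace_alt_go rest s).1), (change_ace_alt_go rest s).2) := by
  induction p with
  | nil => intro rest s; simp
  | cons c p ih =>
    intro rest s
    have hc : c ≠ 11 := fun h => hnm (h ▸ List.mem_cons_self)
    have hp : (11:Int) ∉ p := fun h => hnm (List.mem_cons_of_mem _ h)
    simp only [List.cons_append, change_ace_alt_go, if_neg hc, ih hp rest s]

theorem alt_go_nil (s : Int) : change_ace_alt_go [] s = ([], s) := rfl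

theorem go_eq_alt_go : ∀ (cards : List Int) (s : Int),
    change_ace_go cards s = change_ace_alt_go cards s := by
  intro cards
  induction hc : cards.count 11 using Nat.strong_induction_on generalizing cards with
  | _ n ih =>
  intro s
  rw [change_ace_go]
  split
  · next h =>
    have hnm : (11:Int) ∉ cards := (PySem.List.index?_eq_none_iff _ _).1 h
    have := alt_go_prefix cards hnm [] s
    simpa [alt_go_nil] using this.symm
  · next ace h =>
    rcases (PySem.List.index?_eq_some_iff _ _ _).1 h with ⟨pre, suf, rfl, hlen, hnm⟩
    subst hlen
    have hset : (pre ++ 11 :: suf).set pre.length 1 = pre ++ 1 :: suf := by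
      rw [List.set_append_right _ _ (Nat.le_refl _)]; simp
    rw [hset]
    rw [alt_go_prefix pre hnm (11 :: suf) s]
    simp only [change_ace_alt_go]
    by_cases hlt : s - 10 < 22
    · simp [hlt]
    · simp only [if_neg hlt]
      have hcount : (pre ++ 1 :: suf).count 11 < n := by
        have := pv_count_set_lt (pre ++ 11 :: suf) pre.length (by simpa using h)
        rw [hset] at this; omega
      rw [ih _ hcount _ rfl (s - 10)]
      have hnm1 : (11:Int) ∉ pre ++ [1] := by
        intro hmem
        rcases List.mem_append.1 hmem with hm | hm
        · exact hnm hm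
        · simp at hm
      have := alt_go_prefix (pre ++ [1]) hnm1 suf (s - 10)
      simp only [List.append_assoc, List.singleton_append] at this
      rw [this]
      simp

-- ===== VERDICT (by name: the statement is the Claim_ definition above) =====
theorem change_ace_spec : Claim_equal_change_ace := by
  intro cards _
  show change_ace cards = change_ace_alt cards
  unfold change_ace change_ace_alt
  exact go_eq_alt_go cards cards.sum
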